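-- pv_equiv track=rewrite | github.com/were/UNIT | autotensorize/dse.py | enumerate_inject
-- ===== SOURCE A (Python) =====
-- def enumerate_inject(order, to_inject):
--     idx = list(range(len(to_inject)))
--     while idx[0] != len(order) - 1:
--         res = order[:]
--         for i in range(len(to_inject)):
--             res.insert(idx[i] + i + 1, to_inject[i])
--         yield res
--         idx[-1] += 1
--         while i >= 1 and idx[i] >= len(order):
--             idx[i] = -1
--             idx[i - 1] += 1
--             i -= 1
--         for j in range(i + 1, len(idx)):
--             idx[j] = idx[j - 1] + 1
-- ===== SOURCE B (Python) =====
-- def enumerate_inject(order, to_inject):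
--     # Same results as the original, but each result is built in ONE
--     # interleaving pass (slices + appends) instead of repeated list.insert,
--     # and the next position tuple is computed directly from a pivot scan
--     # instead of the bump/carry(-1)/repair odometer.
--     n = len(order)
--     k = len(to_inject)
--     pos = list(range(k))
--     while pos[0] != n - 1:
--         res = []
--         prev = 0
--         for j in range(k):
--             cut = pos[j] + 1 if pos[j] < n else n
--             res.extend(order[prev:cut])
--             res.append(to_inject[j])
--             prev = cut
--         res.extend(order[prev:])
--         yield res
--         i = k - 1
--         while i > 0 and pos[i] > n - 2:
--             i -= 1
--         base = pos[i] + 1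
--         pos = pos[:i] + [base + d for d in range(k - i)]
-- ===== Notes on version B (the rewrite author's own statement) =====
-- stated objective: alternative
-- what changed: Each yielded list is built in one interleaving pass over the order list (slice + append) instead of k repeated O(n) list.insert calls, and the next position tuple is computed directly by a right-to-left pivot scan and an arithmetic rebuild of the tail instead of the original bump/carry-with-(-1)-sentinel/repair-loop odometer.
import Mathlib
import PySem

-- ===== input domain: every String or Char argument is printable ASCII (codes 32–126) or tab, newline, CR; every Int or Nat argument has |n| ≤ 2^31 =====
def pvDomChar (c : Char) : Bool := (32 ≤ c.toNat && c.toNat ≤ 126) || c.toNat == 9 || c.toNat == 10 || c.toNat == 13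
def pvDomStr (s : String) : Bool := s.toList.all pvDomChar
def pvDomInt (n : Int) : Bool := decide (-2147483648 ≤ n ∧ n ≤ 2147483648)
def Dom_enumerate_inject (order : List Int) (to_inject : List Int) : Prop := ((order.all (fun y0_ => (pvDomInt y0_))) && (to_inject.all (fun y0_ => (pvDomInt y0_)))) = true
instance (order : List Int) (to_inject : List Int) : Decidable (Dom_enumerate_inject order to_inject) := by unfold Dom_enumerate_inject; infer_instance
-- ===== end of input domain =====

-- B builds each result in one interleaving pass and computes the successor
-- position tuple by a pivot scan, instead of A's repeated list.insert and
-- bump/carry/repair odometer; return values are proved equal on Pre_.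


-- ===== PORT A =====
-- res = order[:]; for i in range(len(to_inject)): res.insert(idx[i] + i + 1, to_inject[i])
def pvA_build (order to_inject : List Int) (idx : List Int) : List Int :=
  (List.range to_inject.length).foldl
    (fun res i => PySem.List.insert res (idx.getD i 0 + (i : Int) + 1) (to_inject.getD i 0))
    order

-- while i >= 1 and idx[i] >= len(order): idx[i] = -1; idx[i-1] += 1; i -= 1
def pvA_carry (n : Int) (idx : List Int) (i : Nat) : List Int × Nat :=
  if h : 1 ≤ i ∧ n ≤ idx.getD i 0 then
    pvA_carry n ((idx.set i (-1)).modify (i - 1) (fun x => x + 1)) (i - 1)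
  else (idx, i)
termination_by i
decreasing_by omega

-- for j in range(i + 1, len(idx)): idx[j] = idx[j-1] + 1
def pvA_refill (idx : List Int) (i : Nat) : List Int :=
  (List.range' (i + 1) (idx.length - (i + 1))).foldl
    (fun a j => a.set j (a.getD (j - 1) 0 + 1)) idx

-- the while-loop; the fuel only bounds the iteration count and is never
-- exhausted on Pre_ inputs (each step strictly increases idx lexicographically
-- inside a finite box), so the guard alone decides termination
def pvA_loop (order to_inject : List Int) : Nat → List Int → List (List Int)
  | 0, _ => []
  | fuel + 1, idx =>
      if idx.getD 0 0 = (order.length : Int) - 1 then []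
      else
        let res := pvA_build order to_inject idx
        let idx1 := idx.modify (to_inject.length - 1) (fun x => x + 1)
        let ci := pvA_carry (order.length : Int) idx1 (to_inject.length - 1)
        let idx3 := pvA_refill ci.1 ci.2
        res :: pvA_loop order to_inject fuel idx3

def enumerate_inject (order : List Int) (to_inject : List Int) : List (List Int) :=
  pvA_loop order to_inject
    ((order.length + to_inject.length + 2) ^ (to_inject.length + 1))
    ((List.range to_inject.length).map (fun j => Int.ofNat j))

-- ===== PORT B =====
-- one interleaving pass: res.extend(order[prev:cut]); res.append(to_inject[j])
def pvB_build (order to_inject : List Int) (pos : List Int) : List Int :=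
  let n : Int := order.length
  let s := (List.range to_inject.length).foldl
    (fun (st : List Int × Int) j =>
      let p := pos.getD j 0
      let cut := if p < n then p + 1 else n
      (st.1 ++ PySem.List.slice order (some st.2) (some cut) ++ [to_inject.getD j 0], cut))
    ([], 0)
  s.1 ++ PySem.List.slice order (some s.2) none

-- i = k - 1; while i > 0 and pos[i] > n - 2: i -= 1
def pvB_pivot (n : Int) (pos : List Int) (i : Nat) : Nat :=
  if h : 0 < i ∧ n - 2 < pos.getD i 0 then pvB_pivot n pos (i - 1) else i
termination_by i
decreasing_by omega

-- pos = pos[:i] + [base + d for d in range(k - i)]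
def pvB_next (n : Int) (pos : List Int) : List Int :=
  let i := pvB_pivot n pos (pos.length - 1)
  let base := pos.getD i 0 + 1
  pos.take i ++ (List.range (pos.length - i)).map (fun d => base + Int.ofNat d)

-- the while-loop; same fuel bound as in port A, never exhausted on Pre_ inputs
def pvB_loop (order to_inject : List Int) : Nat → List Int → List (List Int)
  | 0, _ => []
  | fuel + 1, pos =>
      if pos.getD 0 0 = (order.length : Int) - 1 then []
      else
        pvB_build order to_inject pos ::
          pvB_loop order to_inject fuel (pvB_next (order.length : Int) pos)

def enumerate_inject_alt (order : List Int) (to_inject : List Int) : List (List Int) :=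
  pvB_loop order to_inject
    ((order.length + to_inject.length + 2) ^ (to_inject.length + 1))
    ((List.range to_inject.length).map (fun j => Int.ofNat j))

-- ===== PRECONDITION & SPEC =====
-- Pre_ excludes only inputs where A returns no value: to_inject = [] (IndexError
-- on idx[0]) and order = [] (the generator never terminates).
def Pre_enumerate_inject (order : List Int) (to_inject : List Int) : Prop :=
  order ≠ [] ∧ to_inject ≠ []
instance (order : List Int) (to_inject : List Int) : Decidable (Pre_enumerate_inject order to_inject) := by
  unfold Pre_enumerate_inject; infer_instance

def pvWitness_enumerate_inject : List Int × List Int := ([1, 2], [5])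

def Spec_enumerate_inject (order : List Int) (to_inject : List Int) (out : List (List Int)) : Prop :=
  out = enumerate_inject_alt order to_inject
instance (order : List Int) (to_inject : List Int) (out : List (List Int)) : Decidable (Spec_enumerate_inject order to_inject out) := by
  unfold Spec_enumerate_inject; infer_instance

-- ===== CLAIM (what is proved, stated in full; the proofs are below) =====
def Claim_equal_enumerate_inject : Prop := ∀ (order : List Int) (to_inject : List Int), Dom_enumerate_inject order to_inject → Pre_enumerate_inject order to_inject → Spec_enumerate_inject order to_inject (enumerate_inject order to_inject)

-- ===== LEMMAS AND PROOFS =====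

-- the loop invariant: positions are a valid "combination with overflow tail"
def pvV (n k : Nat) (s : List Int) : Prop :=
  s.length = k ∧ 0 ≤ s.getD 0 0 ∧ s.getD 0 0 ≤ (n : Int) - 1 ∧
  ∀ j : Nat, j + 1 < k →
    s.getD j 0 < s.getD (j + 1) 0 ∧ s.getD (j + 1) 0 ≤ max ((n : Int) - 1) (s.getD j 0 + 1)

lemma pv_getD_map_range (k j : Nat) (hj : j < k) :
    ((List.range k).map (fun j => Int.ofNat j)).getD j 0 = (j : Int) := by
  rw [List.getD_eq_getElem _ _ (by simpa using hj)]
  rw [List.getElem_map, List.getElem_range]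
  rfl

lemma pvV_initial (n k : Nat) (hn : 1 ≤ n) (hk : 1 ≤ k) :
    pvV n k ((List.range k).map (fun j => Int.ofNat j)) := by
  refine ⟨by simp, ?_, ?_, ?_⟩
  · rw [pv_getD_map_range k 0 hk]; exact Int.le_refl 0
  · rw [pv_getD_map_range k 0 hk]; omega
  · intro j hj
    rw [pv_getD_map_range k j (by omega), pv_getD_map_range k (j + 1) hj]
    constructor
    · push_cast; omega
    · refine le_trans ?_ (le_max_right _ _); push_cast; omega

lemma pvV_nonneg {n k : Nat} {s : List Int} (h : pvV n k s) :
    ∀ j, j < k → 0 ≤ s.getD j 0 := by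
  intro j hj
  induction j with
  | zero => exact h.2.1
  | succ m ih =>
      have h1 := (h.2.2.2 m hj).1
      have h2 := ih (by omega)
      omega

lemma pv_take_congr (xs ys : List Int) (t : Nat)
    (h : ∀ m, m < t → xs[m]? = ys[m]?) :
    xs.take t = ys.take t := by
  apply List.ext_getElem?
  intro m
  rw [List.getElem?_take, List.getElem?_take]
  by_cases hm : m < t
  · simp only [hm, if_true, h m hm]
  · simp only [hm, if_false]

lemma pv_cons_range (c : Int) (m : Nat) :
    c :: (List.range m).map (fun d => c + 1 + Int.ofNat d) =
      (List.range (m + 1)).map (fun d => c + Int.ofNat d) := by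
  rw [List.range_succ_eq_map, List.map_cons, List.map_map]
  have : c + Int.ofNat 0 = c := by simp
  rw [this]
  congr 1
  apply List.map_congr_left
  intro a _
  simp only [Function.comp, Nat.succ_eq_add_one, Int.ofNat_eq_natCast]
  push_cast
  ring

lemma pv_refill_go : ∀ (m j : Nat) (a : List Int), 0 < j → j + m = a.length →
    (List.range' j m).foldl (fun a j => a.set j (a.getD (j - 1) 0 + 1)) a
      = a.take j ++ (List.range m).map (fun d => a.getD (j - 1) 0 + 1 + Int.ofNat d) := by
  intro m
  induction m with
  | zero =>
      intro j a hj hlen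
      have : a.take j = a := List.take_of_length_le (by omega)
      simp [this]
  | succ m ih =>
      intro j a hj hlen
      rw [List.range'_succ, List.foldl_cons]
      set v := a.getD (j - 1) 0 + 1 with hv
      have hjlen : j < a.length := by omega
      have h1 : (a.set j v).getD (j + 1 - 1) 0 = v := by
        simp only [Nat.add_sub_cancel]
        rw [List.getD_eq_getElem _ _ (by simpa using hjlen), List.getElem_set_self]
      have h2 : (a.set j v).take (j + 1) = a.take j ++ [v] := by
        rw [List.set_eq_take_append_cons_drop, if_pos hjlen]
        rw [List.take_append]
        have hL : (a.take j).length = j := List.length_take_of_le (le_of_lt hjlen)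
        rw [List.take_of_length_le (by omega), hL]
        simp
      rw [ih (j + 1) (a.set j v) (by omega) (by simpa using by omega)]
      rw [h1, h2, List.append_assoc, List.singleton_append, pv_cons_range]

lemma pvB_pivot_le (n : Int) (pos : List Int) (i : Nat) : pvB_pivot n pos i ≤ i := by
  induction i using Nat.strong_induction_on with
  | _ i ih =>
      rw [pvB_pivot]
      split_ifs with h
      · exact le_trans (ih (i - 1) (by omega)) (by omega)
      · exact le_refl i

lemma pvB_pivot_gt (n : Int) (pos : List Int) (i : Nat) :
    ∀ m, pvB_pivot n pos i < m → m ≤ i → n - 2 < pos.getD m 0 := by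
  induction i using Nat.strong_induction_on with
  | _ i ih =>
      rw [pvB_pivot]
      split_ifs with h
      · intro m h1 h2
        by_cases hm : m ≤ i - 1
        · exact ih (i - 1) (by omega) m h1 hm
        · have : m = i := by omega
          exact this ▸ h.2
      · intro m h1 h2
        omega

lemma pvB_pivot_stop (n : Int) (pos : List Int) (i : Nat) :
    pvB_pivot n pos i = 0 ∨ pos.getD (pvB_pivot n pos i) 0 ≤ n - 2 := by
  induction i using Nat.strong_induction_on with
  | _ i ih =>
      rw [pvB_pivot]
      split_ifs with h
      · exact ih (i - 1) (by omega)
      · rcases Nat.eq_zero_or_pos i with h0 | h0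
        · exact Or.inl h0
        · refine Or.inr ?_
          by_contra hc
          exact h ⟨h0, by omega⟩

lemma pv_carry_desc (n : Int) (iStar : Nat) :
    ∀ (d : Nat) (idx : List Int), iStar + d < idx.length →
      (0 < d → n ≤ idx.getD (iStar + d) 0) →
      (∀ m, iStar < m → m < iStar + d → n - 1 ≤ idx.getD m 0) →
      (iStar = 0 ∨ idx.getD iStar 0 < (if 0 < d then n - 1 else n)) →
      (pvA_carry n idx (iStar + d)).2 = iStar ∧
      (pvA_carry n idx (iStar + d)).1.take (iStar + 1) =
        (if 0 < d then idx.modify iStar (fun x => x + 1) else idx).take (iStar + 1) ∧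
      (pvA_carry n idx (iStar + d)).1.length = idx.length := by
  intro d
  induction d with
  | zero =>
      intro idx hlen hcur hmid hstop
      rw [Nat.add_zero] at hlen ⊢
      rw [pvA_carry]
      have hguard : ¬ (1 ≤ iStar ∧ n ≤ idx.getD iStar 0) := by
        rcases hstop with h0 | hlt
        · intro hc; omega
        · rw [if_neg (by omega)] at hlt
          intro hc; omega
      rw [dif_neg hguard, if_neg (by omega)]
      exact ⟨rfl, rfl, rfl⟩
  | succ d ih =>
      intro idx hlen hcur hmid hstop
      rw [pvA_carry]
      have hguard : 1 ≤ iStar + (d + 1) ∧ n ≤ idx.getD (iStar + (d + 1)) 0 :=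
        ⟨by omega, hcur (by omega)⟩
      rw [dif_pos hguard]
      rw [if_pos (show 0 < d + 1 by omega)] at hstop ⊢
      rw [show iStar + (d + 1) - 1 = iStar + d from by omega]
      set idx' := (idx.set (iStar + (d + 1)) (-1)).modify (iStar + d) (fun x => x + 1) with hidx'
      have hlen' : idx'.length = idx.length := by simp [hidx']
      have hgetD' : ∀ m, m < iStar + d → idx'.getD m 0 = idx.getD m 0 := by
        intro m hm
        simp only [hidx', List.getD_eq_getElem?_getD]
        rw [List.getElem?_modify_ne _ _ (by omega), List.getElem?_set_ne (by omega)]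
      have hgetDd : idx'.getD (iStar + d) 0 = idx.getD (iStar + d) 0 + 1 := by
        simp only [hidx', List.getD_eq_getElem?_getD]
        rw [List.getElem?_modify, List.getElem?_set_ne (by omega)]
        have h2 : iStar + d < idx.length := by omega
        rw [List.getElem?_eq_getElem h2]
        simp
      have hstep := ih idx' (by omega)
        (by intro hd
            have h := hmid (iStar + d) (by omega) (by omega)
            omega)
        (by intro m hm1 hm2
            rw [hgetD' m (by omega)]
            exact hmid m hm1 (by omega))
        (by rcases hstop with h0 | hlt
            · exact Or.inl h0
            · right
              rcases Nat.eq_zero_or_pos d with hd | hd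
              · subst hd
                rw [if_neg (by omega)]
                rw [Nat.add_zero] at hgetDd
                omega
              · rw [if_pos hd, hgetD' iStar (by omega)]
                omega)
      refine ⟨hstep.1, ?_, by rw [hstep.2.2, hlen']⟩
      rw [hstep.2.1]
      have htail : ∀ (start : List Int), start = (if 0 < d then idx'.modify iStar (fun x => x + 1) else idx') →
          start.take (iStar + 1) = (idx.modify iStar (fun x => x + 1)).take (iStar + 1) := by
        intro start hstart
        subst hstart
        apply pv_take_congr
        intro q hq
        rcases Nat.eq_zero_or_pos d with hd | hd
        · subst hd
          rw [if_neg (by omega)]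
          simp only [hidx', Nat.add_zero]
          simp only [List.getElem?_modify, List.getElem?_set_ne (show iStar + (0 + 1) ≠ q from by omega)]
        · rw [if_pos hd]
          simp only [hidx']
          by_cases hq2 : q = iStar
          · subst hq2
            simp only [List.getElem?_modify,
              List.getElem?_set_ne (show q + (d + 1) ≠ q from by omega)]
            simp [show d ≠ 0 from by omega]
          · rw [List.getElem?_modify_ne _ _ (by omega), List.getElem?_modify_ne _ _ (by omega),
                List.getElem?_modify_ne _ _ (by omega), List.getElem?_set_ne (by omega)]
      exact htail _ rfl

lemma pv_take_set (a : List Int) (j : Nat) (v : Int) (hj : j < a.length) :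
    (a.set j v).take (j + 1) = a.take j ++ [v] := by
  rw [List.set_eq_take_append_cons_drop, if_pos hj, List.take_append]
  have hL : (a.take j).length = j := List.length_take_of_le (le_of_lt hj)
  rw [List.take_of_length_le (by omega), hL]
  simp

lemma pv_step_eq (order ti s : List Int) (hk : 1 ≤ ti.length)
    (hs : s.length = ti.length) :
    pvA_refill (pvA_carry (order.length : Int) (s.modify (ti.length - 1) (fun x => x + 1)) (ti.length - 1)).1
               (pvA_carry (order.length : Int) (s.modify (ti.length - 1) (fun x => x + 1)) (ti.length - 1)).2
      = pvB_next (order.length : Int) s := by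
  set n : Int := (order.length : Int) with hn
  set k := ti.length with hkk
  set iStar := pvB_pivot n s (k - 1) with hiStar
  have hsk : s.length - 1 = k - 1 := by omega
  have hple : iStar ≤ k - 1 := pvB_pivot_le n s (k - 1)
  have hstop : iStar = 0 ∨ s.getD iStar 0 ≤ n - 2 := pvB_pivot_stop n s (k - 1)
  have hgt : ∀ m, iStar < m → m ≤ k - 1 → n - 2 < s.getD m 0 := pvB_pivot_gt n s (k - 1)
  set idx1 := s.modify (k - 1) (fun x => x + 1) with hidx1
  have hlen1 : idx1.length = k := by rw [hidx1]; simp [hs]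
  have hd1 : ∀ m, m < k - 1 → idx1.getD m 0 = s.getD m 0 := by
    intro m hm
    rw [hidx1]
    simp only [List.getD_eq_getElem?_getD]
    rw [List.getElem?_modify_ne _ _ (by omega)]
  have hdlast : idx1.getD (k - 1) 0 = s.getD (k - 1) 0 + 1 := by
    rw [hidx1]
    simp only [List.getD_eq_getElem?_getD]
    rw [List.getElem?_modify, List.getElem?_eq_getElem (show k - 1 < s.length from by omega)]
    simp
  have hstop1 : iStar = 0 ∨ idx1.getD iStar 0 < (if 0 < k - 1 - iStar then n - 1 else n) := by
    rcases hstop with h | h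
    · exact Or.inl h
    · right
      by_cases hdz : 0 < k - 1 - iStar
      · rw [if_pos hdz, hd1 iStar (by omega)]
        omega
      · rw [if_neg hdz]
        have hieq : iStar = k - 1 := by omega
        rw [hieq, hdlast]
        rw [hieq] at h
        omega
  have hcd := pv_carry_desc n iStar (k - 1 - iStar) idx1
    (by omega)
    (by intro hdpos
        rw [show iStar + (k - 1 - iStar) = k - 1 from by omega, hdlast]
        have := hgt (k - 1) (by omega) (le_refl _)
        omega)
    (by intro m hm1 hm2
        rw [hd1 m (by omega)]
        have := hgt m hm1 (by omega)
        omega)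
    hstop1
  rw [show iStar + (k - 1 - iStar) = k - 1 from by omega] at hcd
  set ci := pvA_carry n idx1 (k - 1) with hci
  have htake : ci.1.take (iStar + 1) = (s.modify iStar (fun x => x + 1)).take (iStar + 1) := by
    rw [hcd.2.1]
    by_cases hdz : 0 < k - 1 - iStar
    · rw [if_pos hdz]
      apply pv_take_congr
      intro q hq
      rw [hidx1]
      simp only [List.getElem?_modify]
      by_cases hq2 : q = iStar
      · simp [hq2, show ¬ (k - 1 = iStar) from by omega]
      · simp [show ¬ (iStar = q) from by omega, show ¬ (k - 1 = q) from by omega]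
    · rw [if_neg hdz, hidx1, show k - 1 = iStar from by omega]
  have hclen : ci.1.length = k := by rw [hcd.2.2, hlen1]
  have hgetiStar : ci.1.getD iStar 0 = s.getD iStar 0 + 1 := by
    have h1 : ci.1[iStar]? = (ci.1.take (iStar + 1))[iStar]? := by
      rw [List.getElem?_take, if_pos (by omega)]
    have h2 : (s.modify iStar (fun x => x + 1))[iStar]? =
        (((s.modify iStar (fun x => x + 1))).take (iStar + 1))[iStar]? := by
      rw [List.getElem?_take, if_pos (by omega)]
    simp only [List.getD_eq_getElem?_getD]
    rw [h1, htake, ← h2, List.getElem?_modify,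
        List.getElem?_eq_getElem (show iStar < s.length from by omega)]
    simp
  have hmod : s.modify iStar (fun x => x + 1) = s.set iStar (s.getD iStar 0 + 1) := by
    rw [List.modify_eq_take_cons_drop (show iStar < s.length from by omega),
        List.set_eq_take_append_cons_drop, if_pos (show iStar < s.length from by omega),
        List.getD_eq_getElem _ _ (show iStar < s.length from by omega)]
  rw [pvA_refill, hcd.1]
  rw [show ci.1.length - (iStar + 1) = k - iStar - 1 from by omega]
  rw [pv_refill_go (k - iStar - 1) (iStar + 1) ci.1 (by omega) (by omega)]
  rw [show iStar + 1 - 1 = iStar from by omega, hgetiStar, htake]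
  rw [hmod, pv_take_set s iStar _ (by omega)]
  rw [List.append_assoc, List.singleton_append, pv_cons_range]
  rw [pvB_next]
  simp only [hsk, ← hiStar]
  rw [show k - iStar - 1 + 1 = k - iStar from by omega, hs]

lemma pvV_step (order ti s : List Int) (hn : 1 ≤ order.length) (hk : 1 ≤ ti.length)
    (hV : pvV order.length ti.length s)
    (hg : s.getD 0 0 ≠ (order.length : Int) - 1) :
    pvV order.length ti.length (pvB_next (order.length : Int) s) := by
  obtain ⟨hs, h00, h01, hchain⟩ := hV
  set n : Int := (order.length : Int) with hn'
  set k := ti.length with hkk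
  set iStar := pvB_pivot n s (k - 1) with hiStar
  have hple : iStar ≤ k - 1 := pvB_pivot_le n s (k - 1)
  have hstop : iStar = 0 ∨ s.getD iStar 0 ≤ n - 2 := pvB_pivot_stop n s (k - 1)
  have hnn : ∀ j, j < k → 0 ≤ s.getD j 0 := by
    intro j hj
    induction j with
    | zero => exact h00
    | succ m ih =>
        have h1 := (hchain m hj).1
        have h2 := ih (by omega)
        omega
  set base := s.getD iStar 0 + 1 with hbase
  have hdecomp : pvB_next n s =
      s.take iStar ++ (List.range (k - iStar)).map (fun d => base + Int.ofNat d) := by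
    rw [pvB_next]
    simp only [hs, ← hiStar, ← hbase]
  have htlen : (pvB_next n s).length = k := by
    rw [hdecomp]
    simp [List.length_take, hs]
    omega
  have hlt : ∀ j, j < iStar → (pvB_next n s)[j]? = s[j]? := by
    intro j hj
    rw [hdecomp, List.getElem?_append_left (by simp [List.length_take, hs]; omega),
        List.getElem?_take, if_pos hj]
  have hge : ∀ j, iStar ≤ j → j < k → (pvB_next n s)[j]? = some (base + Int.ofNat (j - iStar)) := by
    intro j hj1 hj2
    have hlen' : (s.take iStar).length = iStar := List.length_take_of_le (by omega)
    rw [hdecomp, List.getElem?_append_right (by rw [hlen']; omega), hlen']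
    rw [List.getElem?_map, List.getElem?_range (by omega)]
    rfl
  have hltD : ∀ j, j < iStar → (pvB_next n s).getD j 0 = s.getD j 0 := by
    intro j hj
    simp only [List.getD_eq_getElem?_getD, hlt j hj]
  have hgeD : ∀ j, iStar ≤ j → j < k → (pvB_next n s).getD j 0 = base + Int.ofNat (j - iStar) := by
    intro j hj1 hj2
    simp only [List.getD_eq_getElem?_getD, hge j hj1 hj2]
    rfl
  have hbase_le : base ≤ n - 1 := by
    rcases hstop with h | h
    · rw [hbase, h]
      omega
    · omega
  refine ⟨htlen, ?_, ?_, ?_⟩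
  · rcases Nat.eq_zero_or_pos iStar with h | h
    · rw [hgeD 0 (by omega) (by omega)]
      have := hnn iStar (by omega)
      simp only [h, Nat.sub_zero, Int.ofNat_eq_natCast]
      omega
    · rw [hltD 0 h]
      exact h00
  · rcases Nat.eq_zero_or_pos iStar with h | h
    · rw [hgeD 0 (by omega) (by omega)]
      simp only [h, Nat.sub_zero, Int.ofNat_eq_natCast]
      omega
    · rw [hltD 0 h]
      exact h01
  · intro j hj
    by_cases hj1 : j + 1 < iStar
    · rw [hltD j (by omega), hltD (j + 1) hj1]
      exact hchain j hj
    · by_cases hj2 : j + 1 = iStar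
      · rw [hltD j (by omega), hgeD (j + 1) (by omega) (by omega)]
        have hch := hchain j (by omega)
        have : j + 1 - iStar = 0 := by omega
        rw [this]
        simp only [Int.ofNat_eq_natCast, Nat.cast_zero, add_zero]
        constructor
        · have : iStar = j + 1 := by omega
          rw [hbase, this]
          omega
        · refine le_trans ?_ (le_max_left _ _)
          have hiz : iStar ≠ 0 := by omega
          rcases hstop with h | h
          · omega
          · rw [hbase]
            omega
      · rw [hgeD j (by omega) (by omega), hgeD (j + 1) (by omega) (by omega)]
        simp only [Int.ofNat_eq_natCast]
        constructor
        · have : (j - iStar : Nat) < (j + 1 - iStar : Nat) := by omega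
          omega
        · refine le_trans ?_ (le_max_right _ _)
          have : (j + 1 - iStar : Nat) = (j - iStar : Nat) + 1 := by omega
          rw [this]
          push_cast
          omega

lemma pv_insert_ge (xs : List Int) (p : Int) (v : Int) (hp : (xs.length : Int) ≤ p) :
    PySem.List.insert xs p v = xs ++ [v] := by
  unfold PySem.List.insert PySem.List.sliceIndices
  simp [show ¬ p < 0 from by omega, show min p (xs.length : Int) = (xs.length : Int) from by omega]

def pvAstep (ti s : List Int) : List Int → Nat → List Int :=
  fun res i => PySem.List.insert res (s.getD i 0 + (i : Int) + 1) (ti.getD i 0)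

def pvBstep (order ti s : List Int) : (List Int × Int) → Nat → (List Int × Int) :=
  fun st j =>
    let p := s.getD j 0
    let cut := if p < (order.length : Int) then p + 1 else (order.length : Int)
    (st.1 ++ PySem.List.slice order (some st.2) (some cut) ++ [ti.getD j 0], cut)

lemma pv_build_core (order ti s : List Int)
    (hmono : ∀ j, j + 1 < ti.length → s.getD j 0 < s.getD (j + 1) 0)
    (hnn : ∀ j, j < ti.length → 0 ≤ s.getD j 0) :
    ∀ (m j : Nat) (res : List Int) (prev : Int), j + m = ti.length →
      0 ≤ prev → prev ≤ (order.length : Int) →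
      (0 < m → prev ≤ s.getD j 0 + 1) →
      res.length = j + prev.toNat →
      ((List.range' j m).foldl (pvAstep ti s) (res ++ order.drop prev.toNat)
        = ((List.range' j m).foldl (pvBstep order ti s) (res, prev)).1
          ++ order.drop (((List.range' j m).foldl (pvBstep order ti s) (res, prev)).2).toNat)
      ∧ 0 ≤ ((List.range' j m).foldl (pvBstep order ti s) (res, prev)).2 := by
  intro m
  induction m with
  | zero =>
      intro j res prev hjm hp0 hpn hps hres
      exact ⟨rfl, hp0⟩
  | succ m ih =>
      intro j res prev hjm hp0 hpn hps hres
      rw [List.range'_succ, List.foldl_cons, List.foldl_cons]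
      set n : Int := (order.length : Int) with hn
      set cut : Int := if s.getD j 0 < n then s.getD j 0 + 1 else n with hcut
      have hsj0 : 0 ≤ s.getD j 0 := hnn j (by omega)
      have hcut0 : 0 ≤ cut := by
        rw [hcut]; split_ifs <;> omega
      have hcutn : cut ≤ n := by
        rw [hcut]; split_ifs <;> omega
      have hpcut : prev ≤ cut := by
        have := hps (by omega)
        rw [hcut]; split_ifs <;> omega
      have hprevn : prev.toNat ≤ order.length := by omega
      have hcutn' : cut.toNat ≤ order.length := by omega
      have hslice : PySem.List.slice order (some prev) (some cut) =
          (order.drop prev.toNat).take (cut.toNat - prev.toNat) :=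
        PySem.List.slice_toNat order hp0 hcut0
      have hslicelen : (PySem.List.slice order (some prev) (some cut)).length =
          cut.toNat - prev.toNat := by
        rw [hslice, List.length_take, List.length_drop]
        omega
      have hB1 : pvBstep order ti s (res, prev) j =
          (res ++ PySem.List.slice order (some prev) (some cut) ++ [ti.getD j 0], cut) := by
        rw [pvBstep]
      have hinsert : pvAstep ti s (res ++ order.drop prev.toNat) j
          = (res ++ PySem.List.slice order (some prev) (some cut) ++ [ti.getD j 0]) ++ order.drop cut.toNat := by
        rw [pvAstep]
        by_cases hlt : s.getD j 0 < n
        · have hc : cut = s.getD j 0 + 1 := by rw [hcut, if_pos hlt]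
          have hpos : s.getD j 0 + (j : Int) + 1 = ((j + cut.toNat : Nat) : Int) := by
            push_cast
            omega
          rw [hpos, PySem.List.insert_natCast _ _ _ (by
                rw [List.length_append, hres, List.length_drop]
                omega)]
          rw [List.take_append, List.drop_append]
          rw [List.take_of_length_le (show res.length ≤ j + cut.toNat from by omega),
              List.drop_of_length_le (show res.length ≤ j + cut.toNat from by omega)]
          rw [hres]
          rw [show j + cut.toNat - (j + prev.toNat) = cut.toNat - prev.toNat from by omega]
          rw [hslice]
          simp only [List.drop_drop]
          rw [show prev.toNat + (cut.toNat - prev.toNat) = cut.toNat from by omega]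
          simp [List.append_assoc]
        · have hc : cut = n := by rw [hcut, if_neg hlt]
          have hlen : ((res ++ order.drop prev.toNat).length : Int) ≤ s.getD j 0 + (j : Int) + 1 := by
            rw [List.length_append, hres, List.length_drop]
            push_cast
            omega
          rw [pv_insert_ge _ _ _ hlen]
          rw [hslice, hc]
          rw [show n.toNat = order.length from by omega]
          rw [List.take_of_length_le (show (order.drop prev.toNat).length ≤ order.length - prev.toNat from by rw [List.length_drop])]
          rw [List.drop_of_length_le (show order.length ≤ order.length from le_refl _)]
          simp [List.append_assoc]
      rw [hinsert, hB1]
      exact ih (j + 1)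
        (res ++ PySem.List.slice order (some prev) (some cut) ++ [ti.getD j 0]) cut
        (by omega) hcut0 hcutn
        (by intro hm
            have := hmono j (by omega)
            rw [hcut]
            split_ifs <;> omega)
        (by rw [List.length_append, List.length_append, hres, hslicelen]
            simp
            omega)

lemma pv_build_eq (order ti s : List Int)
    (hmono : ∀ j, j + 1 < ti.length → s.getD j 0 < s.getD (j + 1) 0)
    (hnn : ∀ j, j < ti.length → 0 ≤ s.getD j 0) :
    pvA_build order ti s = pvB_build order ti s := by
  have hcore := pv_build_core order ti s hmono hnn ti.length 0 [] 0
    (by omega) (by omega) (by simp) (by intro _; have := hnn 0 (by omega); omega) (by simp)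
  rw [pvA_build, pvB_build]
  rw [show (fun res i => PySem.List.insert res (s.getD i 0 + (i : Int) + 1) (ti.getD i 0)) = pvAstep ti s from rfl]
  rw [show (fun (st : List Int × Int) j =>
      let p := s.getD j 0
      let cut := if p < ((order.length : Int)) then p + 1 else ((order.length : Int))
      (st.1 ++ PySem.List.slice order (some st.2) (some cut) ++ [ti.getD j 0], cut)) = pvBstep order ti s from rfl]
  rw [List.range_eq_range']
  have h1 := hcore.1
  have h2 := hcore.2
  rw [show ([] : List Int) ++ order.drop (0 : Int).toNat = order from by simp] at h1
  rw [h1, PySem.List.slice_from order h2]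

lemma pv_loop_eq (order ti : List Int) (hn : 1 ≤ order.length) (hk : 1 ≤ ti.length) :
    ∀ (fuel : Nat) (s : List Int), pvV order.length ti.length s →
      pvA_loop order ti fuel s = pvB_loop order ti fuel s := by
  intro fuel
  induction fuel with
  | zero => intro s _; rfl
  | succ f ih =>
      intro s hV
      unfold pvA_loop pvB_loop
      by_cases hg : s.getD 0 0 = (order.length : Int) - 1
      · rw [if_pos hg, if_pos hg]
      · rw [if_neg hg, if_neg hg]
        dsimp only
        rw [pv_build_eq order ti s (fun j hj => (hV.2.2.2 j hj).1) (pvV_nonneg hV),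
            pv_step_eq order ti s hk hV.1,
            ih _ (pvV_step order ti s hn hk hV hg)]

-- ===== VERDICT (by name: the statement is the Claim_ definition above) =====
theorem enumerate_inject_spec : Claim_equal_enumerate_inject := by
  intro order ti _ hPre
  unfold Spec_enumerate_inject enumerate_inject enumerate_inject_alt
  have hn : 1 ≤ order.length := List.length_pos_iff.mpr hPre.1
  have hk : 1 ≤ ti.length := List.length_pos_iff.mpr hPre.2
  exact pv_loop_eq order ti hn hk _ _ (pvV_initial _ _ hn hk)
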